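-- pv_equiv track=rewrite | github.com/jeyadosstimothy/advent-of-code | 2024/aoc12.2.py | expand_graph
-- ===== SOURCE A (Python) =====
-- def within_bounds(i, j, graph ):
--     return i >= 0 and j >= 0 and i < len(graph) and j < len(graph[0])
--
-- def expand_graph(graph):
--     expanded_graph = []
--     for i in range(len(graph) * 2):
--         row = []
--         for j in range(len(graph[0]) * 2):
--             ii = i // 2
--             jj = j // 2
--             if i % 2 == 0 and j % 2 == 0:
--                 row.append(graph[ii][jj])
--             elif i % 2 == 0:
--                 if within_bounds(ii, jj + 1, graph) and graph[ii][jj] == graph[ii][jj + 1]: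
--                     row.append(graph[ii][jj])
--                 else:
--                     row.append('.')
--             else:
--                 row.append('.')
--         expanded_graph.append(row)
--     for i in range(len(graph) * 2):
--         for j in range(len(graph[0]) * 2):
--             if i % 2 == 1 and within_bounds(i + 1, j, expanded_graph) and expanded_graph[i - 1][j] == expanded_graph[i + 1][j]:
--                 expanded_graph[i][j] = expanded_graph[i-1][j]
--     return expanded_graph
-- ===== SOURCE B (Python) =====
-- def expand_graph(graph):
--     # Single pass: each output cell is decided by the parity of its coordinates.
--     n = len(graph)
--     m = len(graph[0]) if graph else 0
--
--     def hb(r, c):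
--         # horizontal border between graph[r][c] and graph[r][c+1]
--         v = graph[r][c]
--         return v if c + 1 < m and v == graph[r][c + 1] else '.'
--
--     def cell(i, j):
--         r, c = i // 2, j // 2
--         if i % 2 == 0:
--             return graph[r][c] if j % 2 == 0 else hb(r, c)
--         if j % 2 == 0:
--             return graph[r][c] if r + 1 < n and graph[r][c] == graph[r + 1][c] else '.'
--         return hb(r, c) if r + 1 < n and hb(r, c) == hb(r + 1, c) else '.'
--
--     return [[cell(i, j) for j in range(2 * m)] for i in range(2 * n)]
-- ===== Notes on version B (the rewrite author's own statement) =====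
-- stated objective: simpler
-- what changed: B computes each cell of the doubled grid directly from the parity of its coordinates in a single comprehension pass, instead of A building the grid and then patching odd rows in a second mutation pass.
import Mathlib
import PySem

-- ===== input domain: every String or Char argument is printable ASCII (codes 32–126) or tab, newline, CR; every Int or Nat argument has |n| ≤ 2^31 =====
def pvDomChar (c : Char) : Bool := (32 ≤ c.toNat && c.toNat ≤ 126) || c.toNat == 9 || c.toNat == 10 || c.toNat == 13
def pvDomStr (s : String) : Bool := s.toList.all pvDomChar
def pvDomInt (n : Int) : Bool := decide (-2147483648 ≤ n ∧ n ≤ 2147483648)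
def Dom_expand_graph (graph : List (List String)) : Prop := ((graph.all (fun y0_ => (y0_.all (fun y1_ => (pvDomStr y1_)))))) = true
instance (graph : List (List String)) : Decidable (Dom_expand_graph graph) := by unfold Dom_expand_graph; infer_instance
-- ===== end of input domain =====

-- B computes each cell of the doubled grid directly from the parity of its coordinates in a
-- single pass (objective: simpler), instead of A's build-then-patch second mutation pass.
-- A mutates no argument; the equivalence is about the return value.

-- ===== PORT A =====
-- `graph[x][y]` accesses in A are in range whenever Python A returns (Pre_ below); the
-- default "!" of `getD` is never read there.
def pvWithinBounds (i j : Int) (graph : List (List String)) : Bool :=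
  decide (0 ≤ i) && decide (0 ≤ j) && decide (i < (graph.length : Int)) &&
    decide (j < ((graph.getD 0 []).length : Int))

-- body of the inner append loop of A's first pass
def pvCellA (graph : List (List String)) (i j : Nat) : String :=
  let ii := i / 2
  let jj := j / 2
  if i % 2 == 0 && j % 2 == 0 then (graph.getD ii []).getD jj "!"
  else if i % 2 == 0 then
    if pvWithinBounds (ii : Int) ((jj : Int) + 1) graph &&
        ((graph.getD ii []).getD jj "!" == (graph.getD ii []).getD (jj + 1) "!") then
      (graph.getD ii []).getD jj "!"
    else "."
  else "."

-- condition and assigned value of A's second (mutating) pass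
def pvCondA (eg : List (List String)) (i j : Nat) : Bool :=
  i % 2 == 1 && pvWithinBounds ((i : Int) + 1) (j : Int) eg &&
    ((eg.getD (i - 1) []).getD j "!" == (eg.getD (i + 1) []).getD j "!")

def pvValA (eg : List (List String)) (i j : Nat) : String :=
  (eg.getD (i - 1) []).getD j "!"

-- one step of A's second pass: `expanded_graph[i][j] = expanded_graph[i-1][j]`
def pvStepA (eg : List (List String)) (i j : Nat) : List (List String) :=
  if pvCondA eg i j then eg.set i ((eg.getD i []).set j (pvValA eg i j)) else eg

def expand_graph (graph : List (List String)) : List (List String) :=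
  let expanded := (List.range (graph.length * 2)).map (fun i =>
    (List.range ((graph.getD 0 []).length * 2)).map (fun j => pvCellA graph i j))
  (List.range (graph.length * 2)).foldl (fun eg i =>
    (List.range ((graph.getD 0 []).length * 2)).foldl (fun eg j => pvStepA eg i j) eg) expanded

-- ===== PORT B =====
def pvHB (graph : List (List String)) (m r c : Nat) : String :=
  let v := (graph.getD r []).getD c "!"
  if c + 1 < m && (v == (graph.getD r []).getD (c + 1) "!") then v else "."

def pvCellB (graph : List (List String)) (n m i j : Nat) : String :=
  let r := i / 2
  let c := j / 2
  if i % 2 == 0 then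
    if j % 2 == 0 then (graph.getD r []).getD c "!" else pvHB graph m r c
  else if j % 2 == 0 then
    if r + 1 < n && ((graph.getD r []).getD c "!" == (graph.getD (r + 1) []).getD c "!") then
      (graph.getD r []).getD c "!"
    else "."
  else
    if r + 1 < n && (pvHB graph m r c == pvHB graph m (r + 1) c) then pvHB graph m r c else "."

def expand_graph_alt (graph : List (List String)) : List (List String) :=
  let n := graph.length
  let m := (graph.getD 0 []).length
  (List.range (2 * n)).map (fun i => (List.range (2 * m)).map (fun j => pvCellB graph n m i j))

-- ===== PRECONDITION & SPEC =====
-- Pre_ excludes exactly the ragged grids having a row shorter than row 0, on which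
-- Python A raises IndexError (graph[ii][jj] out of range).
def Pre_expand_graph (graph : List (List String)) : Prop :=
  ∀ row ∈ graph, (graph.getD 0 []).length ≤ row.length
instance (graph : List (List String)) : Decidable (Pre_expand_graph graph) := by
  unfold Pre_expand_graph; infer_instance

def pvWitness_expand_graph : List (List String) := [["A", "A"], ["A", "B"]]

def Spec_expand_graph (graph : List (List String)) (out : List (List String)) : Prop := out = expand_graph_alt graph
instance (graph : List (List String)) (out : List (List String)) : Decidable (Spec_expand_graph graph out) := by unfold Spec_expand_graph; infer_instance

-- ===== CLAIM (what is proved, stated in full; the proofs are below) =====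
def Claim_equal_expand_graph : Prop := ∀ (graph : List (List String)), Dom_expand_graph graph → Pre_expand_graph graph → Spec_expand_graph graph (expand_graph graph)

-- ===== LEMMAS AND PROOFS =====

theorem pv_getD_set_ne {α : Type} (l : List α) (i k : Nat) (x : α) (d : α) (h : k ≠ i) :
    (l.set i x).getD k d = l.getD k d := by
  simp [List.getD, List.getElem?_set_ne (Ne.symm h)]

theorem pv_getD_set_self {α : Type} (l : List α) (i : Nat) (x : α) (d : α) (h : i < l.length) :
    (l.set i x).getD i d = x := by
  simp [List.getD, List.getElem?_set_self h]

-- one step of the second pass, with its condition/value read off a fixed list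
theorem pv_step_congr (eg eg' : List (List String)) (i j : Nat)
    (hlen : eg'.length = eg.length) (h0 : eg'.getD 0 [] = eg.getD 0 [])
    (hm : eg'.getD (i - 1) [] = eg.getD (i - 1) []) (hp : eg'.getD (i + 1) [] = eg.getD (i + 1) []) :
    pvStepA eg' i j =
      if pvCondA eg i j then eg'.set i ((eg'.getD i []).set j (pvValA eg i j)) else eg' := by
  have hc : pvCondA eg' i j = pvCondA eg i j := by
    unfold pvCondA pvWithinBounds; rw [hlen, h0, hm, hp]
  have hv : pvValA eg' i j = pvValA eg i j := by
    unfold pvValA; rw [hm]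
  unfold pvStepA
  rw [hc, hv]

-- the inner fold never touches a row other than i
theorem pv_inner_fix : ∀ (l : List Nat) (eg : List (List String)) (i k : Nat), k ≠ i →
    ((l.foldl (fun a j => pvStepA a i j) eg).getD k []) = eg.getD k [] := by
  intro l
  induction l with
  | nil => intro eg i k h; rfl
  | cons hd tl ih =>
    intro eg i k h
    simp only [List.foldl_cons]
    rw [ih _ _ _ h]
    unfold pvStepA
    split
    · exact pv_getD_set_ne _ _ _ _ _ h
    · rfl

-- the inner fold preserves the number of rows
theorem pv_inner_len : ∀ (l : List Nat) (eg : List (List String)) (i : Nat),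
    (l.foldl (fun a j => pvStepA a i j) eg).length = eg.length := by
  intro l
  induction l with
  | nil => intro eg i; rfl
  | cons hd tl ih =>
    intro eg i
    simp only [List.foldl_cons]
    rw [ih]
    unfold pvStepA
    split <;> simp

-- the inner fold at an odd row i rewrites row i by the corresponding row-level fold,
-- with condition and value read off any list agreeing with eg' on length, row 0 and rows i±1
theorem pv_inner_row : ∀ (l : List Nat) (eg eg' : List (List String)) (i : Nat),
    i % 2 = 1 → i < eg.length →
    eg'.length = eg.length → eg'.getD 0 [] = eg.getD 0 [] →
    eg'.getD (i - 1) [] = eg.getD (i - 1) [] → eg'.getD (i + 1) [] = eg.getD (i + 1) [] →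
    ((l.foldl (fun a j => pvStepA a i j) eg').getD i []) =
      l.foldl (fun row j => if pvCondA eg i j then row.set j (pvValA eg i j) else row) (eg'.getD i []) := by
  intro l
  induction l with
  | nil => intro eg eg' i _ _ _ _ _ _; rfl
  | cons hd tl ih =>
    intro eg eg' i hodd hi hlen h0 hm hp
    simp only [List.foldl_cons]
    rw [pv_step_congr eg eg' i hd hlen h0 hm hp]
    have hi0 : (0 : Nat) ≠ i := by omega
    have him : i - 1 ≠ i := by omega
    have hip : i + 1 ≠ i := by omega
    by_cases h : pvCondA eg i hd = true
    · rw [if_pos h, if_pos h]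
      rw [ih eg _ i hodd hi (by simp [hlen]) (by rw [pv_getD_set_ne _ _ _ _ _ hi0]; exact h0)
        (by rw [pv_getD_set_ne _ _ _ _ _ him]; exact hm)
        (by rw [pv_getD_set_ne _ _ _ _ _ hip]; exact hp)]
      rw [pv_getD_set_self _ _ _ _ (by omega)]
    · rw [if_neg h, if_neg h]
      exact ih eg eg' i hodd hi hlen h0 hm hp

-- the row-level fold preserves the row length
theorem pv_row_fold_len (c : Nat → Bool) (v : Nat → String) :
    ∀ (l : List Nat) (row : List String),
    ((l.foldl (fun row j => if c j then row.set j (v j) else row) row)).length = row.length := by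
  intro l
  induction l with
  | nil => intro row; rfl
  | cons hd tl ih => intro row; simp only [List.foldl_cons]; rw [ih]; split <;> simp

-- closed form of the row-level fold over range M'
theorem pv_row_fold (c : Nat → Bool) (v : Nat → String) :
    ∀ (M' : Nat) (row : List String), M' ≤ row.length → ∀ (p : Nat),
    (((List.range M').foldl (fun row j => if c j then row.set j (v j) else row) row)).getD p "!" =
      if p < M' ∧ c p = true then v p else row.getD p "!" := by
  intro M'
  induction M' with
  | zero => intro row _ p; simp
  | succ M ih =>
    intro row hM p
    rw [List.range_succ, List.foldl_append]
    simp only [List.foldl_cons, List.foldl_nil]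
    have hlen : (((List.range M).foldl (fun row j => if c j then row.set j (v j) else row) row)).length = row.length :=
      pv_row_fold_len c v _ row
    by_cases hpM : p = M
    · subst hpM
      have hnp : ¬ p < p := by omega
      by_cases hcM : c p = true
      · rw [if_pos hcM, pv_getD_set_self _ _ _ _ (by omega)]
        have : p < p + 1 ∧ c p = true := ⟨by omega, hcM⟩
        rw [if_pos this]
      · rw [if_neg hcM, ih row (by omega) p]
        have h1 : ¬ (p < p ∧ c p = true) := fun h => hnp h.1
        have h2 : ¬ (p < p + 1 ∧ c p = true) := fun h => hcM h.2
        rw [if_neg h1, if_neg h2]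
    · have key : ∀ q : List String, q.length = row.length →
          (if c M then q.set M (v M) else q).getD p "!" = q.getD p "!" := by
        intro q _
        split
        · exact pv_getD_set_ne _ _ _ _ _ hpM
        · rfl
      rw [key _ hlen, ih row (by omega) p]
      by_cases hp : p < M
      · have h1 : p < M ∧ c p = true ↔ p < M + 1 ∧ c p = true := by
          constructor <;> (intro h; exact ⟨by omega, h.2⟩)
        by_cases hcp : c p = true
        · rw [if_pos ⟨hp, hcp⟩, if_pos ⟨by omega, hcp⟩]
        · rw [if_neg (fun h => hcp h.2), if_neg (fun h => hcp h.2)]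
      · have h1 : ¬ (p < M ∧ c p = true) := fun h => hp h.1
        have h2 : ¬ (p < M + 1 ∧ c p = true) := by
          intro h; exact hpM (by omega)
        rw [if_neg h1, if_neg h2]

-- an inner fold at an even row is the identity
theorem pv_inner_even : ∀ (l : List Nat) (eg : List (List String)) (i : Nat), i % 2 = 0 →
    l.foldl (fun a j => pvStepA a i j) eg = eg := by
  intro l
  induction l with
  | nil => intro eg i _; rfl
  | cons hd tl ih =>
    intro eg i h
    simp only [List.foldl_cons]
    have hc : pvCondA eg i hd = false := by
      unfold pvCondA
      have h1 : (i % 2 == 1) = false := by simp [h]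
      simp [h1]
    have hs : pvStepA eg i hd = eg := by
      unfold pvStepA
      rw [hc]
      simp
    rw [hs]
    exact ih eg i h

-- the final row an odd row i of eg0 is rewritten to by the whole second pass
def pvFinalRow (eg0 : List (List String)) (M i : Nat) : List String :=
  (List.range M).foldl (fun row j => if pvCondA eg0 i j then row.set j (pvValA eg0 i j) else row)
    (eg0.getD i [])

-- outer fold: closed form of every row of the second pass
theorem pv_outer : ∀ (T : Nat) (eg0 : List (List String)) (M : Nat), T ≤ eg0.length →
    (∀ k, (((List.range T).foldl (fun eg i => (List.range M).foldl (fun a j => pvStepA a i j) eg) eg0).getD k []) =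
      if k < T ∧ k % 2 = 1 then pvFinalRow eg0 M k else eg0.getD k []) ∧
    (((List.range T).foldl (fun eg i => (List.range M).foldl (fun a j => pvStepA a i j) eg) eg0).length = eg0.length) := by
  intro T
  induction T with
  | zero =>
    intro eg0 M _
    constructor
    · intro k; simp
    · rfl
  | succ T ih =>
    intro eg0 M hT
    obtain ⟨ihrow, ihlen⟩ := ih eg0 M (by omega)
    rw [List.range_succ, List.foldl_append]
    simp only [List.foldl_cons, List.foldl_nil]
    refine ⟨?_, by rw [pv_inner_len]; exact ihlen⟩
    intro k
    by_cases hkT : k = T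
    · subst hkT
      by_cases hodd : k % 2 = 1
      · have h0 : _root_.List.getD ((List.range k).foldl (fun eg i => (List.range M).foldl (fun a j => pvStepA a i j) eg) eg0) 0 [] = eg0.getD 0 [] := by
          rw [ihrow 0]
          have : ¬ ((0 : Nat) < k ∧ 0 % 2 = 1) := by omega
          rw [if_neg this]
        have hm : _root_.List.getD ((List.range k).foldl (fun eg i => (List.range M).foldl (fun a j => pvStepA a i j) eg) eg0) (k - 1) [] = eg0.getD (k - 1) [] := by
          rw [ihrow (k - 1)]
          have : ¬ (k - 1 < k ∧ (k - 1) % 2 = 1) := by omega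
          rw [if_neg this]
        have hp : _root_.List.getD ((List.range k).foldl (fun eg i => (List.range M).foldl (fun a j => pvStepA a i j) eg) eg0) (k + 1) [] = eg0.getD (k + 1) [] := by
          rw [ihrow (k + 1)]
          have : ¬ (k + 1 < k ∧ (k + 1) % 2 = 1) := by omega
          rw [if_neg this]
        have hk : _root_.List.getD ((List.range k).foldl (fun eg i => (List.range M).foldl (fun a j => pvStepA a i j) eg) eg0) k [] = eg0.getD k [] := by
          rw [ihrow k]
          have : ¬ (k < k ∧ k % 2 = 1) := by omega
          rw [if_neg this]
        rw [pv_inner_row (List.range M) eg0 _ k hodd (by omega) ihlen h0 hm hp, hk]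
        have : k < k + 1 ∧ k % 2 = 1 := ⟨by omega, hodd⟩
        rw [if_pos this]
        rfl
      · rw [pv_inner_even _ _ _ (by omega), ihrow k]
        have h1 : ¬ (k < k ∧ k % 2 = 1) := fun h => hodd h.2
        have h2 : ¬ (k < k + 1 ∧ k % 2 = 1) := fun h => hodd h.2
        rw [if_neg h1, if_neg h2]
    · rw [pv_inner_fix _ _ _ _ hkT, ihrow k]
      by_cases hk : k < T ∧ k % 2 = 1
      · rw [if_pos hk, if_pos ⟨by omega, hk.2⟩]
      · have h2 : ¬ (k < T + 1 ∧ k % 2 = 1) := by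
          intro h; exact hk ⟨by omega, h.2⟩
        rw [if_neg hk, if_neg h2]

-- first-pass rows: lookup
theorem pv_pass1_row (graph : List (List String)) (i : Nat) (h : i < graph.length * 2) :
    (((List.range (graph.length * 2)).map (fun i =>
      (List.range ((graph.getD 0 []).length * 2)).map (fun j => pvCellA graph i j))).getD i []) =
      (List.range ((graph.getD 0 []).length * 2)).map (fun j => pvCellA graph i j) := by
  rw [List.getD_eq_getElem _ _ (by simpa using h)]
  simp

theorem pv_map_row_getD (f : Nat → String) (M p : Nat) (h : p < M) :
    (((List.range M).map f).getD p "!") = f p := by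
  rw [List.getD_eq_getElem _ _ (by simpa using h)]
  simp

-- within_bounds over natural indices
theorem pv_wb_nat (g : List (List String)) (a b : Nat) :
    pvWithinBounds (a : Int) (b : Int) g =
      (decide (a < g.length) && decide (b < (g.getD 0 []).length)) := by
  unfold pvWithinBounds
  simp

theorem pv_wb_succ (g : List (List String)) (a b : Nat) :
    pvWithinBounds ((a : Int) + 1) (b : Int) g =
      (decide (a + 1 < g.length) && decide (b < (g.getD 0 []).length)) := by
  have e : ((a : Int) + 1) = ((a + 1 : Nat) : Int) := by push_cast; ring
  rw [e, pv_wb_nat]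

theorem pv_wb_div (g : List (List String)) (a b : Nat) (ha : a / 2 < g.length) :
    pvWithinBounds ((a : Int) / 2) ((b : Int) / 2 + 1) g =
      decide (b / 2 + 1 < (g.getD 0 []).length) := by
  have e1 : ((a : Int) / 2) = ((a / 2 : Nat) : Int) := by push_cast; ring
  have e2 : ((b : Int) / 2 + 1) = ((b / 2 + 1 : Nat) : Int) := by push_cast; ring
  rw [e1, e2, pv_wb_nat]
  simp [ha]

theorem pv_wb_div' (g : List (List String)) (a b : Nat) (ha : a / 2 + 1 < g.length) :
    pvWithinBounds ((a : Int) / 2 + 1) ((b : Int) / 2 + 1) g =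
      decide (b / 2 + 1 < (g.getD 0 []).length) := by
  have e1 : ((a : Int) / 2 + 1) = ((a / 2 + 1 : Nat) : Int) := by push_cast; ring
  have e2 : ((b : Int) / 2 + 1) = ((b / 2 + 1 : Nat) : Int) := by push_cast; ring
  rw [e1, e2, pv_wb_nat]
  simp [ha]

-- per-cell equality, even rows: A's first-pass cell equals B's cell
theorem pv_cell_even (g : List (List String)) (k p : Nat)
    (hk2 : k % 2 = 0) (hk : k < g.length * 2) (hp : p < (g.getD 0 []).length * 2) :
    pvCellA g k p = pvCellB g g.length (g.getD 0 []).length k p := by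
  have hr : k / 2 < g.length := by omega
  rcases Nat.mod_two_eq_zero_or_one p with hp2 | hp2
  · unfold pvCellA pvCellB
    simp [hk2, hp2]
  · unfold pvCellA pvCellB pvHB
    simp only [hk2, hp2]
    simp only [Nat.reduceBEq, Bool.true_and]
    simp
    rw [pv_wb_div g k p hr]
    simp

-- per-cell equality, odd rows: A's patched value equals B's cell
theorem pv_cell_odd (g : List (List String)) (k p : Nat)
    (hk2 : k % 2 = 1) (hk : k < g.length * 2) (hp : p < (g.getD 0 []).length * 2) :
    (if k + 1 < g.length * 2 ∧ pvCellA g (k - 1) p = pvCellA g (k + 1) p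
      then pvCellA g (k - 1) p else pvCellA g k p) =
      pvCellB g g.length (g.getD 0 []).length k p := by
  have hr : k / 2 < g.length := by omega
  have hm1 : (k - 1) % 2 = 0 := by omega
  have hp1 : (k + 1) % 2 = 0 := by omega
  have hd1 : (k - 1) / 2 = k / 2 := by omega
  have hd2 : (k + 1) / 2 = k / 2 + 1 := by omega
  have hguard : (k + 1 < g.length * 2) ↔ (k / 2 + 1 < g.length) := by omega
  have hAk : pvCellA g k p = "." := by
    unfold pvCellA
    have h1 : (k % 2 == 0) = false := by simp [hk2]
    simp [h1]
  rcases Nat.mod_two_eq_zero_or_one p with hp2 | hp2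
  · -- p even: vertical border between g[r][c] and g[r+1][c]
    have hAm : pvCellA g (k - 1) p = (g.getD (k / 2) []).getD (p / 2) "!" := by
      unfold pvCellA
      simp [hm1, hp2, hd1]
    have hAp : pvCellA g (k + 1) p = (g.getD (k / 2 + 1) []).getD (p / 2) "!" := by
      unfold pvCellA
      simp [hp1, hp2, hd2]
    have hB : pvCellB g g.length (g.getD 0 []).length k p =
        (if k / 2 + 1 < g.length ∧
            (g.getD (k / 2) []).getD (p / 2) "!" = (g.getD (k / 2 + 1) []).getD (p / 2) "!"
          then (g.getD (k / 2) []).getD (p / 2) "!" else ".") := by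
      unfold pvCellB
      have h1 : (k % 2 == 0) = false := by simp [hk2]
      simp [h1, hp2]
    rw [hAm, hAp, hAk, hB]
    by_cases hg : k / 2 + 1 < g.length
    · have hg' : k + 1 < g.length * 2 := hguard.mpr hg
      by_cases he : (g.getD (k / 2) []).getD (p / 2) "!" = (g.getD (k / 2 + 1) []).getD (p / 2) "!"
      · rw [if_pos ⟨hg', he⟩, if_pos ⟨hg, he⟩]
      · rw [if_neg (fun h => he h.2), if_neg (fun h => he h.2)]
    · have hg' : ¬ k + 1 < g.length * 2 := fun h => hg (hguard.mp h)
      rw [if_neg (fun h => hg' h.1), if_neg (fun h => hg h.1)]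
  · -- p odd: horizontal borders of the rows above and below
    have hAm : pvCellA g (k - 1) p = pvHB g (g.getD 0 []).length (k / 2) (p / 2) := by
      unfold pvCellA pvHB
      simp only [hm1, hp2, hd1]
      simp
      rw [pv_wb_div g k p hr]
      simp
    have hAp : k + 1 < g.length * 2 →
        pvCellA g (k + 1) p = pvHB g (g.getD 0 []).length (k / 2 + 1) (p / 2) := by
      intro hg
      unfold pvCellA pvHB
      simp only [hp1, hp2, hd2]
      simp
      rw [pv_wb_div' g k p (by omega)]
      simp
    have hB : pvCellB g g.length (g.getD 0 []).length k p =
        (if k / 2 + 1 < g.length ∧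
            pvHB g (g.getD 0 []).length (k / 2) (p / 2) = pvHB g (g.getD 0 []).length (k / 2 + 1) (p / 2)
          then pvHB g (g.getD 0 []).length (k / 2) (p / 2) else ".") := by
      unfold pvCellB
      have h1 : (k % 2 == 0) = false := by simp [hk2]
      have h2 : (p % 2 == 0) = false := by simp [hp2]
      simp [h1, h2]
    rw [hAk, hB]
    by_cases hg : k / 2 + 1 < g.length
    · have hg' : k + 1 < g.length * 2 := hguard.mpr hg
      rw [hAm, hAp hg']
      by_cases he : pvHB g (g.getD 0 []).length (k / 2) (p / 2) = pvHB g (g.getD 0 []).length (k / 2 + 1) (p / 2)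
      · rw [if_pos ⟨hg', he⟩, if_pos ⟨hg, he⟩]
      · rw [if_neg (fun h => he h.2), if_neg (fun h => he h.2)]
    · have hg' : ¬ k + 1 < g.length * 2 := fun h => hg (hguard.mp h)
      rw [if_neg (fun h => hg' h.1), if_neg (fun h => hg h.1)]

-- the first pass of A, named for the proofs
def pvPass1 (g : List (List String)) : List (List String) :=
  (List.range (g.length * 2)).map (fun i =>
    (List.range ((g.getD 0 []).length * 2)).map (fun j => pvCellA g i j))

theorem pvPass1_len (g : List (List String)) : (pvPass1 g).length = g.length * 2 := by
  simp [pvPass1]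

theorem pvPass1_getD (g : List (List String)) (i : Nat) (h : i < g.length * 2) :
    (pvPass1 g).getD i [] = (List.range ((g.getD 0 []).length * 2)).map (fun j => pvCellA g i j) := by
  unfold pvPass1
  exact pv_pass1_row g i h

theorem pvPass1_cell (g : List (List String)) (i p : Nat)
    (hi : i < g.length * 2) (hp : p < (g.getD 0 []).length * 2) :
    ((pvPass1 g).getD i []).getD p "!" = pvCellA g i p := by
  rw [pvPass1_getD g i hi]
  exact pv_map_row_getD _ _ _ hp

-- the second-pass condition over the first pass, as a condition on graph's cells
theorem pv_condA_pass1 (g : List (List String)) (k p : Nat)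
    (hodd : k % 2 = 1) (hk : k < g.length * 2) (hp : p < (g.getD 0 []).length * 2) :
    pvCondA (pvPass1 g) k p =
      (decide (k + 1 < g.length * 2) && (pvCellA g (k - 1) p == pvCellA g (k + 1) p)) := by
  have h0 : 0 < g.length := by omega
  have hrow0 : ((pvPass1 g).getD 0 []).length = (g.getD 0 []).length * 2 := by
    rw [pvPass1_getD g 0 (by omega)]
    simp
  unfold pvCondA
  have h1 : (k % 2 == 1) = true := by simp [hodd]
  rw [pv_wb_succ (pvPass1 g) k p, pvPass1_len, hrow0]
  have h2 : decide (p < (g.getD 0 []).length * 2) = true := decide_eq_true hp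
  by_cases hg : k + 1 < g.length * 2
  · have e1 : ((pvPass1 g).getD (k - 1) []).getD p "!" = pvCellA g (k - 1) p :=
      pvPass1_cell g (k - 1) p (by omega) hp
    have e2 : ((pvPass1 g).getD (k + 1) []).getD p "!" = pvCellA g (k + 1) p :=
      pvPass1_cell g (k + 1) p (by omega) hp
    rw [e1, e2, h2]
    simp [h1, hg]
  · have h3 : decide (k + 1 < g.length * 2) = false := by simp [hg]
    rw [h2, h3]
    simp [h1]

theorem pv_valA_pass1 (g : List (List String)) (k p : Nat)
    (hk : k - 1 < g.length * 2) (hp : p < (g.getD 0 []).length * 2) :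
    pvValA (pvPass1 g) k p = pvCellA g (k - 1) p := by
  unfold pvValA
  exact pvPass1_cell g (k - 1) p hk hp

-- the main equality of the two ports (no precondition needed: both ports read the same cells)
theorem pv_main (g : List (List String)) : expand_graph g = expand_graph_alt g := by
  have hA : expand_graph g = (List.range (g.length * 2)).foldl
      (fun eg i => (List.range ((g.getD 0 []).length * 2)).foldl (fun eg j => pvStepA eg i j) eg)
      (pvPass1 g) := rfl
  obtain ⟨hrow, hlen⟩ := pv_outer (g.length * 2) (pvPass1 g) ((g.getD 0 []).length * 2)
    (by rw [pvPass1_len])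
  have hlenA : (expand_graph g).length = g.length * 2 := by
    rw [hA, hlen, pvPass1_len]
  have hlenB : (expand_graph_alt g).length = g.length * 2 := by
    unfold expand_graph_alt
    simp [Nat.mul_comm]
  apply List.ext_getElem (by rw [hlenA, hlenB])
  intro k hk1 hk2
  have hk : k < g.length * 2 := by rw [hlenA] at hk1; exact hk1
  have hBrow : (expand_graph_alt g)[k] =
      (List.range (2 * (g.getD 0 []).length)).map
        (fun j => pvCellB g g.length (g.getD 0 []).length k j) := by
    unfold expand_graph_alt
    simp
  have hArow : (expand_graph g)[k] = (expand_graph g).getD k [] := by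
    rw [List.getD_eq_getElem _ _ hk1]
  rw [hArow, hBrow, hA, hrow k]
  by_cases hodd : k % 2 = 1
  · rw [if_pos ⟨hk, hodd⟩]
    -- odd row: closed form of the patched row
    have hrlen : (pvFinalRow (pvPass1 g) ((g.getD 0 []).length * 2) k).length =
        (g.getD 0 []).length * 2 := by
      unfold pvFinalRow
      rw [pv_row_fold_len, pvPass1_getD g k hk]
      simp
    apply List.ext_getElem (by rw [hrlen]; simp [Nat.mul_comm])
    intro p hq1 hq2
    have hp : p < (g.getD 0 []).length * 2 := by rw [hrlen] at hq1; exact hq1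
    rw [← List.getD_eq_getElem _ "!" hq1, ← List.getD_eq_getElem _ "!" hq2]
    rw [pv_map_row_getD _ _ _ (by omega)]
    unfold pvFinalRow
    rw [pv_row_fold _ _ _ _ (by rw [pvPass1_getD g k hk]; simp) p]
    rw [pvPass1_cell g k p hk hp]
    by_cases hc : pvCondA (pvPass1 g) k p = true
    · have hc' := hc
      rw [pv_condA_pass1 g k p hodd hk hp] at hc'
      simp only [Bool.and_eq_true, decide_eq_true_eq, beq_iff_eq] at hc'
      rw [if_pos ⟨hp, hc⟩]
      rw [pv_valA_pass1 g k p (by omega) hp]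
      rw [← pv_cell_odd g k p hodd hk hp]
      rw [if_pos hc']
    · have hc' := hc
      rw [pv_condA_pass1 g k p hodd hk hp] at hc'
      simp only [Bool.and_eq_true, decide_eq_true_eq, beq_iff_eq] at hc'
      have h2 : ¬ ((p < (g.getD 0 []).length * 2) ∧ pvCondA (pvPass1 g) k p = true) :=
        fun h => hc h.2
      rw [if_neg h2]
      rw [← pv_cell_odd g k p hodd hk hp]
      rw [if_neg (fun h => hc' ⟨h.1, h.2⟩)]
  · have h1 : ¬ (k < g.length * 2 ∧ k % 2 = 1) := fun h => hodd h.2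
    rw [if_neg h1]
    rw [pvPass1_getD g k hk]
    apply List.ext_getElem (by simp [Nat.mul_comm])
    intro p hq1 hq2
    have hp : p < (g.getD 0 []).length * 2 := by simpa using hq1
    rw [← List.getD_eq_getElem _ "!" hq1, ← List.getD_eq_getElem _ "!" hq2]
    rw [pv_map_row_getD _ _ _ hp, pv_map_row_getD _ _ _ (by omega)]
    exact pv_cell_even g k p (by omega) hk hp

-- ===== VERDICT (by name: the statement is the Claim_ definition above) =====
theorem expand_graph_spec : Claim_equal_expand_graph := by
  intro g _ _
  unfold Spec_expand_graph
  exact pv_main g
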